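-- pv_equiv track=rewrite | github.com/daehuikim/codetree | 250411/1차원 윷놀이/yutnori-1d.py | goal_check
-- ===== SOURCE A (Python) =====
-- def goal_check(answer,m):
--     count=0
--     count_dict = {item[0]: 0 for item in answer}
--     for a in answer:
--         count_dict[a[0]]+=a[1]
--     for val in count_dict.values():
--         if val >= m-1:
--             count += 1
--     return count
-- ===== SOURCE B (Python) =====
-- def goal_check(answer, m):
--     count = 0
--     cur = None
--     run = 0
--     for k, v in sorted(answer, key=lambda x: x[0]):
--         if cur is None:
--             cur, run = k, v
--         elif k != cur:
--             if run >= m - 1: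
--                 count += 1
--             cur, run = k, v
--         else:
--             run += v
--     if cur is not None and run >= m - 1:
--         count += 1
--     return count
-- ===== Notes on version B (the rewrite author's own statement) =====
-- stated objective: alternative
-- what changed: Replaced A's dict-based grouping (prefill keys with 0, accumulate per-key sums, count values >= m-1) by sorting a copy of answer by key and counting qualifying runs of equal keys in a single scan with a current-key/running-sum accumulator.
import Mathlib
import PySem

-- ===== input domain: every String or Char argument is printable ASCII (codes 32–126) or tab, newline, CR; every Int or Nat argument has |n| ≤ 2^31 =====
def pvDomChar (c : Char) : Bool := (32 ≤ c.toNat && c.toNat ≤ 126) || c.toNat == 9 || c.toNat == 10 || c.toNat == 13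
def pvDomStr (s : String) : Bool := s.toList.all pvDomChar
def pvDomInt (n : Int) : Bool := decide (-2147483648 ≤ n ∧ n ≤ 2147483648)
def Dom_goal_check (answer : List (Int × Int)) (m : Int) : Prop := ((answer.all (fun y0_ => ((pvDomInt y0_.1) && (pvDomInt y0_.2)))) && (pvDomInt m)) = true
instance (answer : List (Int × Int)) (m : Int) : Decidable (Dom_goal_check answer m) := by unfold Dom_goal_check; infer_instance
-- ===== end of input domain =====

-- B replaces A's dict-based grouping by sort-by-key and a single scan over adjacent runs (alternative decomposition, same result).

-- ===== PORT A =====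
-- A: build a dict {key: 0}, accumulate the per-key sums, count values ≥ m-1.
def goal_check (answer : List (Int × Int)) (m : Int) : Int :=
  let count_dict : PySem.Dict Int Int :=
    answer.foldl (fun d item => d.insert item.1 0) PySem.Dict.empty
  let count_dict :=
    answer.foldl (fun d a => d.modify a.1 0 (fun x => x + a.2)) count_dict
  count_dict.values.foldl (fun count val => if val ≥ m - 1 then count + 1 else count) 0

-- ===== PORT B =====
-- one scan step: flush the finished run when the key changes
def bStep (t : Int) (st : Int × Option Int × Int) (kv : Int × Int) : Int × Option Int × Int :=
  match st with
  | (count, none, _run) => (count, some kv.1, kv.2)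
  | (count, some ck, run) =>
    if kv.1 ≠ ck then ((if run ≥ t then count + 1 else count), some kv.1, kv.2)
    else (count, some ck, run + kv.2)

-- flush the last run after the loop
def bFinish (t : Int) (st : Int × Option Int × Int) : Int :=
  match st with
  | (count, none, _) => count
  | (count, some _, run) => if run ≥ t then count + 1 else count

def goal_check_alt (answer : List (Int × Int)) (m : Int) : Int :=
  bFinish (m - 1) ((PySem.List.sorted answer (fun x => x.1) false).foldl (bStep (m - 1)) (0, none, 0))

-- ===== PRECONDITION & SPEC =====
def Spec_goal_check (answer : List (Int × Int)) (m : Int) (out : Int) : Prop := out = goal_check_alt answer m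
instance (answer : List (Int × Int)) (m : Int) (out : Int) : Decidable (Spec_goal_check answer m out) := by unfold Spec_goal_check; infer_instance

-- ===== CLAIM (what is proved, stated in full; the proofs are below) =====
def Claim_equal_goal_check : Prop := ∀ (answer : List (Int × Int)) (m : Int), Dom_goal_check answer m → Spec_goal_check answer m (goal_check answer m)

-- ===== LEMMAS AND PROOFS =====

-- total value accumulated for key k
def keySum (l : List (Int × Int)) (k : Int) : Int := ((l.filter (fun p => p.1 == k)).map (·.2)).sum

-- number of distinct keys of l whose total is ≥ t
def cnt (t : Int) (l : List (Int × Int)) : Int :=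
  (((PySem.Set.ofList (l.map (·.1))).filter (fun k => decide (keySum l k ≥ t))).length : Int)

theorem L1 (l : List (Int × Int)) (d : PySem.Dict Int Int) (k : Int) (h : d.getD k 0 = 0) :
    (l.foldl (fun d item => d.insert item.1 0) d).getD k 0 = 0 := by
  induction l generalizing d with
  | nil => simpa using h
  | cons a l ih =>
    simp only [List.foldl_cons]
    apply ih
    rw [PySem.Dict.getD_insert]
    split_ifs <;> simp [h]

theorem L2 (l : List (Int × Int)) (d : PySem.Dict Int Int) (k : Int) :
    (l.foldl (fun d a => d.modify a.1 0 (fun x => x + a.2)) d).getD k 0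
      = d.getD k 0 + keySum l k := by
  induction l generalizing d with
  | nil => simp [keySum]
  | cons a l ih =>
    simp only [List.foldl_cons, ih]
    rw [PySem.Dict.getD_modify]
    by_cases hk : k = a.1
    · simp [keySum, hk]
      ring
    · have : (a.1 == k) = false := by simp [Ne.symm hk]
      simp [keySum, this, hk]

theorem L3keys (answer : List (Int × Int)) :
    ((answer.foldl (fun d a => d.modify a.1 0 (fun x => x + a.2))
        (answer.foldl (fun d item => d.insert item.1 0) PySem.Dict.empty)).keys)
      = PySem.Set.ofList (answer.map (·.1)) := by
  rw [PySem.Dict.keys_foldl_modify_key, PySem.Dict.keys_foldl_insert_key]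
  rw [PySem.Dict.keys_empty, PySem.Set.update_nil_left]
  rw [PySem.Set.update_eq_append_filter]
  have : (PySem.Set.ofList (answer.map (·.1))).filter
      (fun y => !(PySem.Set.contains (PySem.Set.ofList (answer.map (·.1))) y)) = [] := by
    apply List.filter_eq_nil_iff.2
    intro y hy
    have hmem : y ∈ answer.map (·.1) := (PySem.Set.mem_ofList _ _).1 hy
    obtain ⟨p, hp, rfl⟩ := List.mem_map.1 hmem
    simp
    exact ⟨p.2, by simpa using hp⟩
  simp [this]

theorem L3nodup (answer : List (Int × Int)) :
    ((answer.foldl (fun d a => d.modify a.1 0 (fun x => x + a.2))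
        (answer.foldl (fun d item => d.insert item.1 0) PySem.Dict.empty)).keys).Nodup := by
  apply PySem.Dict.nodup_keys_foldl_modify_key
  apply PySem.Dict.nodup_keys_foldl_insert_key
  exact PySem.Dict.nodup_keys_empty

theorem L4 (t : Int) (vals : List Int) (c : Int) :
    vals.foldl (fun count val => if val ≥ t then count + 1 else count) c
      = c + ((vals.filter (fun v => decide (v ≥ t))).length : Int) := by
  induction vals generalizing c with
  | nil => simp
  | cons v vs ih =>
    simp only [List.foldl_cons, ih, List.filter_cons]
    by_cases h : v ≥ t
    · simp [h]; ring
    · simp [h]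

theorem A_eq_cnt (answer : List (Int × Int)) (m : Int) :
    goal_check answer m = cnt (m - 1) answer := by
  have hd := L3nodup answer
  simp only [goal_check]
  rw [L4, PySem.Dict.values_eq_map_keys _ hd 0, List.filter_map, List.length_map]
  have hg : ∀ k : Int,
      ((answer.foldl (fun d a => d.modify a.1 0 (fun x => x + a.2))
        (answer.foldl (fun d item => d.insert item.1 0) PySem.Dict.empty)).getD k 0)
        = keySum answer k := by
    intro k
    rw [L2, L1 _ _ _ (by simp [PySem.Dict.getD_empty])]
    ring
  have hp : ((fun v => decide (v ≥ m - 1)) ∘ fun k =>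
      (answer.foldl (fun d a => d.modify a.1 0 (fun x => x + a.2))
        (answer.foldl (fun d item => d.insert item.1 0) PySem.Dict.empty)).getD k 0)
      = fun k => decide (keySum answer k ≥ m - 1) := by
    funext k; simp [hg k]
  rw [hp, L3keys]
  simp [cnt]

theorem ofList_filter (xs : List Int) (q : Int → Bool) :
    PySem.Set.ofList (xs.filter q) = (PySem.Set.ofList xs).filter q := by
  induction xs using List.reverseRecOn with
  | nil => simp [PySem.Set.ofList_nil]
  | append_singleton xs x ih =>
    rw [List.filter_append, PySem.Set.ofList_append_singleton, PySem.Set.add_eq_ite]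
    by_cases hq : q x = true
    · have hfl : List.filter q [x] = [x] := by simp [hq]
      rw [hfl, PySem.Set.ofList_append_singleton, PySem.Set.add_eq_ite]
      by_cases hx : x ∈ PySem.Set.ofList xs
      · have hx' : x ∈ PySem.Set.ofList (xs.filter q) := by
          rw [PySem.Set.mem_ofList] at hx ⊢
          exact List.mem_filter.2 ⟨hx, hq⟩
        rw [if_pos hx', if_pos hx, ih]
      · have hx' : x ∉ PySem.Set.ofList (xs.filter q) := by
          rw [PySem.Set.mem_ofList] at hx ⊢
          intro hc; exact hx (List.mem_filter.1 hc).1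
        rw [if_neg hx', if_neg hx, List.filter_append, ih, hfl]
    · have hfl : List.filter q [x] = [] := by simp [hq]
      rw [hfl, List.append_nil, ih]
      by_cases hx : x ∈ PySem.Set.ofList xs
      · rw [if_pos hx]
      · rw [if_neg hx, List.filter_append]
        have : List.filter q [x] = [] := hfl
        rw [this, List.append_nil]

theorem keySum_filter_ne (u : List (Int × Int)) (k1 k' : Int) (h : k' ≠ k1) :
    keySum (u.filter (fun p => p.1 != k1)) k' = keySum u k' := by
  have heq : (u.filter (fun p => p.1 != k1)).filter (fun p => p.1 == k')
      = u.filter (fun p => p.1 == k') := by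
    rw [List.filter_filter]
    apply List.filter_congr
    intro p _
    by_cases hp : p.1 = k' <;> simp [hp, h]
  unfold keySum
  rw [heq]

theorem countPeel (S : List Int) (hS : S.Nodup) (k1 : Int) (h : k1 ∈ S) (P : Int → Bool) :
    (S.filter P).length = (if P k1 then 1 else 0) + ((S.filter (fun x => x != k1)).filter P).length := by
  induction S with
  | nil => simp at h
  | cons x xs ih =>
    rw [List.nodup_cons] at hS
    rcases List.mem_cons.1 h with rfl | hmem
    · have hnot : xs.filter (fun x => x != k1) = xs := by
        apply List.filter_eq_self.2
        intro a ha
        simp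
        rintro rfl; exact hS.1 ha
      simp only [List.filter_cons]
      by_cases hp : P k1
      · simp [hp, hnot]; omega
      · simp [hp, hnot]
    · have hx : x ≠ k1 := by rintro rfl; exact hS.1 hmem
      simp only [List.filter_cons]
      by_cases hp : P x
      · simp [hp, hx, ih hS.2 hmem]
        omega
      · simp [hp, hx, ih hS.2 hmem]

theorem peel (t : Int) (u : List (Int × Int)) (k1 : Int) (h : k1 ∈ u.map (·.1)) :
    cnt t u = (if keySum u k1 ≥ t then 1 else 0) + cnt t (u.filter (fun p => p.1 != k1)) := by
  unfold cnt
  have hmap : (u.filter (fun p => p.1 != k1)).map (·.1) = (u.map (·.1)).filter (fun x => x != k1) := by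
    rw [List.filter_map]; rfl
  rw [hmap, ofList_filter]
  have hcong : ((PySem.Set.ofList (u.map (·.1))).filter (fun x => x != k1)).filter
        (fun k => decide (keySum (u.filter (fun p => p.1 != k1)) k ≥ t))
      = ((PySem.Set.ofList (u.map (·.1))).filter (fun x => x != k1)).filter
        (fun k => decide (keySum u k ≥ t)) := by
    apply List.filter_congr
    intro k hk
    have : k ≠ k1 := by simpa using (List.mem_filter.1 hk).2
    rw [keySum_filter_ne u k1 k this]
  rw [hcong]
  rw [countPeel _ (PySem.Set.nodup_ofList _) k1 (by rw [PySem.Set.mem_ofList]; exact h)]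
  by_cases hp : keySum u k1 ≥ t
  · simp [hp]
  · simp [hp]

theorem keySum_cons (a : Int × Int) (l : List (Int × Int)) (k : Int) :
    keySum (a :: l) k = (if a.1 = k then a.2 else 0) + keySum l k := by
  unfold keySum
  rw [List.filter_cons]
  by_cases h : a.1 = k <;> simp [h]

theorem keySum_eq_zero (l : List (Int × Int)) (k : Int) (h : ∀ p ∈ l, p.1 ≠ k) :
    keySum l k = 0 := by
  unfold keySum
  have : l.filter (fun p => p.1 == k) = [] := by
    apply List.filter_eq_nil_iff.2
    intro p hp
    simp [h p hp]
  simp [this]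

theorem cnt_nil (t : Int) : cnt t [] = 0 := by simp [cnt]

theorem scan_run (t : Int) (l : List (Int × Int)) :
    ∀ (c r k : Int), (∀ p ∈ l, k ≤ p.1) → l.Pairwise (fun a b => a.1 ≤ b.1) →
    bFinish t (l.foldl (bStep t) (c, some k, r))
      = c + (if r + keySum l k ≥ t then 1 else 0) + cnt t (l.filter (fun p => p.1 != k)) := by
  induction l with
  | nil =>
    intro c r k _ _
    simp [bFinish, keySum, cnt]
    split_ifs <;> ring
  | cons a l ih =>
    intro c r k hge hpw
    rw [List.pairwise_cons] at hpw
    simp only [List.foldl_cons]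
    by_cases hak : a.1 = k
    · have hstep : bStep t (c, some k, r) a = (c, some k, r + a.2) := by
        simp [bStep, hak]
      rw [hstep, ih c (r + a.2) k (fun p hp => hge p (List.mem_cons_of_mem a hp)) hpw.2]
      rw [keySum_cons, if_pos hak, List.filter_cons]
      have : (a.1 != k) = false := by simp [hak]
      rw [this]
      simp only [Bool.false_eq_true, if_neg (by simp : ¬False)]
      have harith : r + a.2 + keySum l k = r + (a.2 + keySum l k) := by ring
      rw [harith]
    · have hstep : bStep t (c, some k, r) a
          = ((if r ≥ t then c + 1 else c), some a.1, a.2) := by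
        simp [bStep, hak]
      rw [hstep, ih _ a.2 a.1 hpw.1 hpw.2]
      have hklt : k < a.1 := lt_of_le_of_ne (hge a (List.mem_cons_self)) (Ne.symm hak)
      have hlk : ∀ p ∈ l, p.1 ≠ k := fun p hp => by
        have := hpw.1 p hp; omega
      have hsum0 : keySum (a :: l) k = 0 := by
        apply keySum_eq_zero
        intro p hp
        rcases List.mem_cons.1 hp with rfl | hm
        · exact hak
        · exact hlk p hm
      have hfilt : (a :: l).filter (fun p => p.1 != k) = a :: l := by
        apply List.filter_eq_self.2
        intro p hp
        rcases List.mem_cons.1 hp with rfl | hm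
        · simp [hak]
        · simp [hlk p hm]
      rw [hsum0, hfilt]
      have hmem : a.1 ∈ (a :: l).map (·.1) := by simp
      rw [peel t (a :: l) a.1 hmem]
      rw [keySum_cons, if_pos rfl, List.filter_cons]
      have : (a.1 != a.1) = false := by simp
      rw [this]
      simp only [Bool.false_eq_true, if_neg (by simp : ¬False)]
      rw [add_zero]
      split_ifs <;> ring

theorem keySum_perm (l l' : List (Int × Int)) (h : l.Perm l') (k : Int) :
    keySum l k = keySum l' k := by
  unfold keySum
  exact ((h.filter _).map _).sum_eq

theorem cnt_perm (t : Int) (l l' : List (Int × Int)) (h : l.Perm l') :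
    cnt t l = cnt t l' := by
  unfold cnt
  have hpred : (fun k => decide (keySum l k ≥ t)) = (fun k => decide (keySum l' k ≥ t)) := by
    funext k; rw [keySum_perm l l' h k]
  have hS : (PySem.Set.ofList (l.map (·.1))).Perm (PySem.Set.ofList (l'.map (·.1))) := by
    rw [List.perm_ext_iff_of_nodup (PySem.Set.nodup_ofList _) (PySem.Set.nodup_ofList _)]
    intro x
    rw [PySem.Set.mem_ofList, PySem.Set.mem_ofList]
    exact (h.map _).mem_iff
  rw [hpred, (hS.filter _).length_eq]

theorem B_eq_cnt (answer : List (Int × Int)) (m : Int) :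
    goal_check_alt answer m = cnt (m - 1) answer := by
  unfold goal_check_alt
  have hperm : (PySem.List.sorted answer (fun x => x.1) false).Perm answer :=
    PySem.List.sorted_perm answer _ false
  have hpw := PySem.List.sorted_pairwise answer (fun x : Int × Int => x.1)
  rw [← cnt_perm (m - 1) _ _ hperm]
  cases hcase : PySem.List.sorted answer (fun x => x.1) false with
  | nil => simp [bFinish, cnt_nil]
  | cons a l =>
    rw [hcase] at hpw
    rw [List.pairwise_cons] at hpw
    simp only [List.foldl_cons]
    have hstep : bStep (m - 1) (0, none, 0) a = (0, some a.1, a.2) := by simp [bStep]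
    rw [hstep, scan_run (m - 1) l 0 a.2 a.1 hpw.1 hpw.2]
    have hmem : a.1 ∈ (a :: l).map (·.1) := by simp
    rw [peel (m - 1) (a :: l) a.1 hmem]
    rw [keySum_cons, if_pos rfl, List.filter_cons]
    have hne : (a.1 != a.1) = false := by simp
    rw [hne]
    simp only [Bool.false_eq_true, if_neg (by simp : ¬False)]
    ring

-- ===== VERDICT (by name: the statement is the Claim_ definition above) =====
theorem goal_check_spec : Claim_equal_goal_check := by
  intro answer m _
  show goal_check answer m = goal_check_alt answer m
  rw [A_eq_cnt, B_eq_cnt]
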